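-- pv_equiv track=rewrite | github.com/graik/biskit | biskit/molUtils.py | resType
-- ===== SOURCE A (Python) =====
-- def resType( resCode ):
--     """
--     Classify residues as aromatic (a), charged (c) or polar (p).
--
--     :param resCode: amino acid code
--     :type  resCode: str
--
--     :return: list of types this residue belongs to...
--     :rtype: a|c|p OR None
--     """
--     types = {'a' : ['F','Y','W','H'],     ## aromatic
--              'c' : ['E','D','L','R','H'], ## charged
--              'p' : ['Q','N','S'] }        ## polar
--
--     result = []
--
--     for t in types.keys():
--         if resCode in types[t]:
--             result += [t]
--
--     if result == []:
--         result = ['u']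
--
--     return result
-- ===== SOURCE B (Python) =====
-- # B: precomputed inverted lookup table (code -> ordered type letters); one dict access per call.
-- _TYPES = {'a': ['F', 'Y', 'W', 'H'],     # aromatic
--           'c': ['E', 'D', 'L', 'R', 'H'],  # charged
--           'p': ['Q', 'N', 'S']}            # polar
--
-- _TABLE = {}
-- for _t, _codes in _TYPES.items():
--     for _code in _codes:
--         _TABLE.setdefault(_code, []).append(_t)
--
--
-- def resType(resCode):
--     return list(_TABLE.get(resCode, ['u']))
-- ===== Notes on version B (the rewrite author's own statement) =====
-- stated objective: idiomatic
-- what changed: Replaces the per-call loop over three categories with membership tests by a module-level inverted table mapping each amino-acid code to its ordered list of type letters, so each call is a single dict lookup with default ['u'].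
import Mathlib
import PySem

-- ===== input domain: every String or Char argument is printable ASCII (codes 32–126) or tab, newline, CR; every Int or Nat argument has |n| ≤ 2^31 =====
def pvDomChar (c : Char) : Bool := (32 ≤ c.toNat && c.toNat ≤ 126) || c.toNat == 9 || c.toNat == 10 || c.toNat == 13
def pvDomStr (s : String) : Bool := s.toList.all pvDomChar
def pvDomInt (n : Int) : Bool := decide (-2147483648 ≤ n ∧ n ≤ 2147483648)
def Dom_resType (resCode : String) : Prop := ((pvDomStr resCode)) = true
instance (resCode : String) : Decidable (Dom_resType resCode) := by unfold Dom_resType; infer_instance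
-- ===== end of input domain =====

-- B replaces A's per-call loop over the three categories (membership test each) by a
-- precomputed inverted code->types table and a single keyed lookup (objective: idiomatic).

-- ===== PORT A =====
-- A's literal category dict {'a': …, 'c': …, 'p': …}
def resTypesDict : PySem.Dict String (List String) :=
  PySem.Dict.ofList [("a", ["F","Y","W","H"]),
                     ("c", ["E","D","L","R","H"]),
                     ("p", ["Q","N","S"])]

def resType (resCode : String) : List String :=
  let result : List String :=
    resTypesDict.keys.foldl
      (fun result t => if (resTypesDict.getD t []).contains resCode then result ++ [t] else result) []
  if result = [] then ["u"] else result

-- ===== PORT B =====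
-- module-level inverted table, built (as in Source B) by looping over the category dict
def resTypeTable : PySem.Dict String (List String) :=
  ([("a", ["F","Y","W","H"]),
    ("c", ["E","D","L","R","H"]),
    ("p", ["Q","N","S"])] : List (String × List String)).foldl
    (fun d tc =>
      tc.2.foldl (fun d code => d.insert code (d.getD code [] ++ [tc.1])) d)
    PySem.Dict.empty

def resType_alt (resCode : String) : List String :=
  resTypeTable.getD resCode ["u"]

-- ===== PRECONDITION & SPEC =====
def Spec_resType (resCode : String) (out : List String) : Prop := out = resType_alt resCode
instance (resCode : String) (out : List String) : Decidable (Spec_resType resCode out) := by unfold Spec_resType; infer_instance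

-- ===== CLAIM (what is proved, stated in full; the proofs are below) =====
def Claim_equal_resType : Prop := ∀ (resCode : String), Dom_resType resCode → Spec_resType resCode (resType resCode)

-- ===== LEMMAS AND PROOFS =====

-- all amino-acid codes either program treats specially
def pvCodes : List String := ["F","Y","W","H","E","D","L","R","Q","N","S"]

theorem resType_eq_alt (s : String) : resType s = resType_alt s := by
  by_cases h : s ∈ pvCodes
  · fin_cases h <;> decide
  · simp only [pvCodes, List.mem_cons, List.not_mem_nil, or_false, not_or] at h
    obtain ⟨hF, hY, hW, hH, hE, hD, hL, hR, hQ, hN, hS⟩ := h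
    have hA : resType s = ["u"] := by
      have hk : resTypesDict.keys = ["a","c","p"] := by decide
      have e1 : resTypesDict.getD "a" [] = ["F","Y","W","H"] := by decide
      have e2 : resTypesDict.getD "c" [] = ["E","D","L","R","H"] := by decide
      have e3 : resTypesDict.getD "p" [] = ["Q","N","S"] := by decide
      simp only [resType, hk, List.foldl, e1, e2, e3]
      simp [List.contains_eq_mem, hF, hY, hW, hH, hE, hD, hL, hR, hQ, hN, hS]
    have hB : resType_alt s = ["u"] := by
      have hT : resTypeTable = PySem.Dict.mk
          [("F",["a"]),("Y",["a"]),("W",["a"]),("H",["a","c"]),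
           ("E",["c"]),("D",["c"]),("L",["c"]),("R",["c"]),
           ("Q",["p"]),("N",["p"]),("S",["p"])] := by decide
      rw [resType_alt, hT, PySem.Dict.getD_eq_get?_getD]
      simp [PySem.Dict.get?,
        Ne.symm hF, Ne.symm hY, Ne.symm hW, Ne.symm hH, Ne.symm hE, Ne.symm hD,
        Ne.symm hL, Ne.symm hR, Ne.symm hQ, Ne.symm hN, Ne.symm hS]
    rw [hA, hB]

-- ===== VERDICT (by name: the statement is the Claim_ definition above) =====
theorem resType_spec : Claim_equal_resType := by
  intro s _
  exact resType_eq_alt s
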